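-- pv_equiv track=rewrite | github.com/sinhakrishnendu/babappasnake | babappasnake/scripts/compare_alignment_methods.py | detect_significance_key
-- ===== SOURCE A (Python) =====
-- def detect_significance_key(rows: list[dict[str, str]]) -> str | None:
--     preferred = ("significant_BH_0.05", "significant_BH_0.1", "significant_BH")
--     available = {key for row in rows for key in row.keys()}
--     for key in preferred:
--         if key in available:
--             return key
--     for key in sorted(available):
--         if key.startswith("significant_BH_"):
--             return key
--     return None
-- ===== SOURCE B (Python) =====
-- def detect_significance_key(rows: list[dict[str, str]]) -> str | None:
--     for key in ("significant_BH_0.05", "significant_BH_0.1", "significant_BH"):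
--         if any(key in row for row in rows):
--             return key
--     best = None
--     for row in rows:
--         for key in row:
--             if key.startswith("significant_BH_") and (best is None or key < best):
--                 best = key
--     return best
-- ===== Notes on version B (the rewrite author's own statement) =====
-- stated objective: alternative
-- what changed: Removes the union set and the sort: B scans rows directly per preferred key, and replaces sorted-then-first-match with a single running-minimum pass over prefix-matching keys.
import Mathlib
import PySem

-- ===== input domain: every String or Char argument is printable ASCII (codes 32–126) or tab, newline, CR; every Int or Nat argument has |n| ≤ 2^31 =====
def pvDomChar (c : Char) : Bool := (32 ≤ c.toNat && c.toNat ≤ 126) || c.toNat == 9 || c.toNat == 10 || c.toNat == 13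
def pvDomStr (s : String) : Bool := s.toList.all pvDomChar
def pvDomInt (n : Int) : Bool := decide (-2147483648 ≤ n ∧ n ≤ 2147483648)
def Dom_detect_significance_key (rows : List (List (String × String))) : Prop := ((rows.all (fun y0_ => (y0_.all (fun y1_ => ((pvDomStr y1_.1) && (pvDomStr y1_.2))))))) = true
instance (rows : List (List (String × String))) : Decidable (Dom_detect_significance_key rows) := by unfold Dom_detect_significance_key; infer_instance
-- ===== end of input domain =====

-- B removes the union set and the sort: per-candidate scans, then one running-minimum pass. Return value only.

-- ===== PORT A =====
-- available = {key for row in rows for key in row.keys()}  (keys() of a dict given as assoc list: first occurrences)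
def detect_significance_key (rows : List (List (String × String))) : Option String :=
  let available : PySem.Set String :=
    PySem.Set.ofList (rows.flatMap (fun row => PySem.List.dedup (row.map Prod.fst)))
  -- for key in preferred: if key in available: return key
  if PySem.Set.contains available "significant_BH_0.05" then some "significant_BH_0.05"
  else if PySem.Set.contains available "significant_BH_0.1" then some "significant_BH_0.1"
  else if PySem.Set.contains available "significant_BH" then some "significant_BH"
  else
    -- for key in sorted(available): if key.startswith("significant_BH_"): return key
    (PySem.List.sorted available (fun x => x) false).find?
      (fun k => PySem.Str.startswith k "significant_BH_")

-- ===== PORT B =====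
-- any(key in row for row in rows)
def dskAltHas (rows : List (List (String × String))) (key : String) : Bool :=
  rows.any (fun row => row.any (fun p => p.1 == key))

-- if key.startswith("significant_BH_") and (best is None or key < best): best = key
def dskAltStep (best : Option String) (key : String) : Option String :=
  if PySem.Str.startswith key "significant_BH_" &&
      (match best with | none => true | some b => decide (key < b))
  then some key else best

def detect_significance_key_alt (rows : List (List (String × String))) : Option String :=
  if dskAltHas rows "significant_BH_0.05" then some "significant_BH_0.05"
  else if dskAltHas rows "significant_BH_0.1" then some "significant_BH_0.1"
  else if dskAltHas rows "significant_BH" then some "significant_BH"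
  else
    rows.foldl (fun best row => row.foldl (fun best p => dskAltStep best p.1) best) none

-- ===== PRECONDITION & SPEC =====
def Spec_detect_significance_key (rows : List (List (String × String))) (out : Option String) : Prop := out = detect_significance_key_alt rows
instance (rows : List (List (String × String))) (out : Option String) : Decidable (Spec_detect_significance_key rows out) := by unfold Spec_detect_significance_key; infer_instance

-- ===== CLAIM (what is proved, stated in full; the proofs are below) =====
def Claim_equal_detect_significance_key : Prop := ∀ (rows : List (List (String × String))), Dom_detect_significance_key rows → Spec_detect_significance_key rows (detect_significance_key rows)

-- ===== LEMMAS AND PROOFS =====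

-- the two membership tests agree
theorem dsk_has_iff (rows : List (List (String × String))) (key : String) :
    dskAltHas rows key = true ↔
      key ∈ rows.flatMap (fun row => PySem.List.dedup (row.map Prod.fst)) := by
  simp only [dskAltHas, List.any_eq_true, List.mem_flatMap, PySem.List.mem_dedup,
    List.mem_map, beq_iff_eq]

def dskP (k : String) : Bool := PySem.Str.startswith k "significant_BH_"

-- the common characterisation of both fallback results over a key list
def MinSpec (xs : List String) (o : Option String) : Prop :=
  match o with
  | none => ∀ y ∈ xs, dskP y = false
  | some m => m ∈ xs ∧ dskP m = true ∧ ∀ y ∈ xs, dskP y = true → m ≤ y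

theorem minSpec_unique {xs : List String} {o₁ o₂ : Option String}
    (h₁ : MinSpec xs o₁) (h₂ : MinSpec xs o₂) : o₁ = o₂ := by
  match o₁, o₂, h₁, h₂ with
  | none, none, _, _ => rfl
  | none, some m, h₁, h₂ => exact absurd h₂.2.1 (by simp [h₁ m h₂.1])
  | some m, none, h₁, h₂ => exact absurd h₁.2.1 (by simp [h₂ m h₁.1])
  | some m₁, some m₂, h₁, h₂ =>
    exact congrArg some (le_antisymm (h₁.2.2 m₂ h₂.1 h₂.2.1) (h₂.2.2 m₁ h₁.1 h₁.2.1))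

-- find? on a strictly increasing list returns the minimum match
theorem find?_minSpec : ∀ (s : List String), s.Pairwise (· < ·) → MinSpec s (s.find? dskP) := by
  intro s hp
  induction s with
  | nil => simp [MinSpec]
  | cons a t ih =>
    rcases List.pairwise_cons.mp hp with ⟨ha, ht⟩
    by_cases hpa : dskP a = true
    · simp only [List.find?_cons_of_pos hpa, MinSpec]
      refine ⟨List.mem_cons_self, hpa, ?_⟩
      intro y hy _
      rcases List.mem_cons.mp hy with rfl | hy
      · exact le_refl _
      · exact le_of_lt (ha y hy)
    · have hpa' : dskP a = false := by simpa using hpa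
      rw [List.find?_cons_of_neg (by simp [hpa'])]
      have := ih ht
      cases hfind : t.find? dskP with
      | none =>
        simp only [hfind, MinSpec] at this ⊢
        intro y hy
        rcases List.mem_cons.mp hy with rfl | hy
        · exact hpa'
        · exact this y hy
      | some m =>
        simp only [hfind, MinSpec] at this ⊢
        refine ⟨List.mem_cons_of_mem _ this.1, this.2.1, ?_⟩
        intro y hy hpy
        rcases List.mem_cons.mp hy with rfl | hy
        · exact absurd hpy (by simp [hpa'])
        · exact this.2.2 y hy hpy

-- B's step, rephrased
theorem dskAltStep_eq (best : Option String) (key : String) :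
    dskAltStep best key =
      if dskP key = true then
        (match best with | none => some key | some b => some (min key b))
      else best := by
  unfold dskAltStep dskP
  generalize PySem.Str.startswith key "significant_BH_" = c
  cases c with
  | false => cases best <;> simp
  | true =>
    cases best with
    | none => simp
    | some b =>
      by_cases hlt : key < b
      · simp [hlt, min_eq_left (le_of_lt hlt)]
      · simp [hlt, min_eq_right (le_of_not_gt hlt)]

-- invariant of B's folded minimum over one key list
theorem foldl_step_minSpec (ys : List String) :
    ∀ (acc : Option String) (xs : List String), MinSpec xs acc →
      MinSpec (xs ++ ys) (ys.foldl dskAltStep acc) := by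
  induction ys with
  | nil => intro acc xs h; simpa using h
  | cons a t ih =>
    intro acc xs h
    have hstep : MinSpec (xs ++ [a]) (dskAltStep acc a) := by
      rw [dskAltStep_eq]
      by_cases hpa : dskP a = true
      · simp only [hpa]
        cases acc with
        | none =>
          simp only [MinSpec] at h ⊢
          refine ⟨by simp, hpa, ?_⟩
          intro y hy hpy
          rcases List.mem_append.mp hy with hy | hy
          · exact absurd hpy (by simp [h y hy])
          · simp at hy; subst hy; exact le_refl _
        | some b =>
          simp only [MinSpec] at h ⊢
          refine ⟨?_, ?_, ?_⟩
          · rcases le_total a b with hab | hab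
            · simp [min_eq_left hab]
            · exact List.mem_append.mpr (Or.inl (by simpa [min_eq_right hab] using h.1))
          · rcases le_total a b with hab | hab
            · simpa [min_eq_left hab] using hpa
            · simpa [min_eq_right hab] using h.2.1
          · intro y hy hpy
            rcases List.mem_append.mp hy with hy | hy
            · exact le_trans (min_le_right a b) (h.2.2 y hy hpy)
            · have hya : y = a := by simpa using hy
              rw [hya]; exact min_le_left a b
      · have hpa' : dskP a = false := by simpa using hpa
        rw [if_neg (by simp [hpa'])]
        cases acc with
        | none =>
          simp only [MinSpec] at h ⊢
          intro y hy
          rcases List.mem_append.mp hy with hy | hy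
          · exact h y hy
          · have hya : y = a := by simpa using hy
            rw [hya]; exact hpa'
        | some b =>
          simp only [MinSpec] at h ⊢
          refine ⟨List.mem_append.mpr (Or.inl h.1), h.2.1, ?_⟩
          intro y hy hpy
          rcases List.mem_append.mp hy with hy | hy
          · exact h.2.2 y hy hpy
          · simp at hy; subst hy; exact absurd hpy (by simp [hpa'])
    have := ih (dskAltStep acc a) (xs ++ [a]) hstep
    simpa [List.append_assoc] using this

-- MinSpec only depends on which strings occur
theorem minSpec_congr {xs ys : List String} (h : ∀ z, z ∈ xs ↔ z ∈ ys) {o : Option String}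
    (hx : MinSpec xs o) : MinSpec ys o := by
  cases o with
  | none => intro y hy; exact hx y ((h y).mpr hy)
  | some m => exact ⟨(h m).mp hx.1, hx.2.1, fun y hy => hx.2.2 y ((h y).mpr hy)⟩

-- B's double fold satisfies MinSpec over the flattened key list
theorem alt_fold_minSpec (rows : List (List (String × String))) :
    MinSpec (rows.flatMap (fun row => row.map Prod.fst))
      (rows.foldl (fun best row => row.foldl (fun best p => dskAltStep best p.1) best) none) := by
  suffices h : ∀ (acc : Option String) (xs : List String), MinSpec xs acc →
      MinSpec (xs ++ rows.flatMap (fun row => row.map Prod.fst))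
        (rows.foldl (fun best row => row.foldl (fun best p => dskAltStep best p.1) best) acc) by
    simpa using h none [] (by simp [MinSpec])
  induction rows with
  | nil => intro acc xs h; simpa using h
  | cons r t ih =>
    intro acc xs h
    have hr : r.foldl (fun best p => dskAltStep best p.1) acc
        = (r.map Prod.fst).foldl dskAltStep acc := by
      rw [List.foldl_map]
    have h1 : MinSpec (xs ++ r.map Prod.fst) (r.foldl (fun best p => dskAltStep best p.1) acc) := by
      rw [hr]; exact foldl_step_minSpec _ acc xs h
    have := ih (r.foldl (fun best p => dskAltStep best p.1) acc) (xs ++ r.map Prod.fst) h1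
    simpa [List.append_assoc] using this

-- ===== VERDICT (by name: the statement is the Claim_ definition above) =====
theorem detect_significance_key_spec : Claim_equal_detect_significance_key := by
  intro rows _
  unfold Spec_detect_significance_key detect_significance_key detect_significance_key_alt
  have hmem : ∀ key : String,
      PySem.Set.contains
        (PySem.Set.ofList (rows.flatMap (fun row => PySem.List.dedup (row.map Prod.fst)))) key
        = dskAltHas rows key := by
    intro key
    apply Bool.eq_iff_iff.mpr
    rw [dsk_has_iff]
    simp only [PySem.Set.contains_iff, PySem.Set.mem_ofList]
  simp only [hmem]
  by_cases h1 : dskAltHas rows "significant_BH_0.05" = true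
  · simp [h1]
  · simp only [Bool.not_eq_true] at h1
    by_cases h2 : dskAltHas rows "significant_BH_0.1" = true
    · simp [h1, h2]
    · simp only [Bool.not_eq_true] at h2
      by_cases h3 : dskAltHas rows "significant_BH" = true
      · simp [h1, h2, h3]
      · simp only [Bool.not_eq_true] at h3
        simp only [h1, h2, h3, Bool.false_eq_true, if_false]
        -- both fallbacks satisfy MinSpec over the same key set
        have hA := find?_minSpec _
          (PySem.List.sorted_ofList_pairwise_lt
            (rows.flatMap (fun row => PySem.List.dedup (row.map Prod.fst))))
        have hB := alt_fold_minSpec rows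
        refine minSpec_unique (xs := rows.flatMap (fun row => row.map Prod.fst))
          (minSpec_congr ?_ hA) hB
        intro z
        simp [PySem.List.mem_sorted, PySem.Set.mem_ofList]
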